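-- pv_equiv track=rewrite | github.com/ezekielp/algorithms-practice | pacificAtlanticWaterFlow.py | fillInMatrix
-- ===== SOURCE A (Python) =====
-- def fillInMatrix(matrix):
--     toFill = []
--     for row in range(len(matrix)):
--         toFill.append([False] * len(matrix[0]))
--     for i in range(len(toFill)):
--         for j in range(len(toFill[0])):
--             if i == 0 or j == 0:
--                 toFill[i][j] = True
--             else:
--                 if (matrix[i][j] >= matrix[i - 1][j] and toFill[i - 1][j]) or (matrix[i][j] >= matrix[i][j - 1] and toFill[i][j - 1]):
--                     toFill[i][j] = True
--     return toFill
-- ===== SOURCE B (Python) =====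
-- def fillInMatrix(matrix):
--     rows = len(matrix)
--     cols = len(matrix[0]) if matrix else 0
--     memo = {}
--
--     def reach(i, j):
--         if (i, j) not in memo:
--             if i == 0 or j == 0:
--                 memo[(i, j)] = True
--             else:
--                 memo[(i, j)] = (matrix[i][j] >= matrix[i - 1][j] and reach(i - 1, j)) \
--                     or (matrix[i][j] >= matrix[i][j - 1] and reach(i, j - 1))
--         return memo[(i, j)]
--
--     return [[reach(i, j) for j in range(cols)] for i in range(rows)]
-- ===== Notes on version B (the rewrite author's own statement) =====
-- stated objective: alternative
-- what changed: B replaces A's in-place bottom-up table sweep by top-down memoized recursion computed directly from the reachability recurrence (cell true iff on the top/left border or flowing from a true up/left neighbour with a >= step).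
import Mathlib
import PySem

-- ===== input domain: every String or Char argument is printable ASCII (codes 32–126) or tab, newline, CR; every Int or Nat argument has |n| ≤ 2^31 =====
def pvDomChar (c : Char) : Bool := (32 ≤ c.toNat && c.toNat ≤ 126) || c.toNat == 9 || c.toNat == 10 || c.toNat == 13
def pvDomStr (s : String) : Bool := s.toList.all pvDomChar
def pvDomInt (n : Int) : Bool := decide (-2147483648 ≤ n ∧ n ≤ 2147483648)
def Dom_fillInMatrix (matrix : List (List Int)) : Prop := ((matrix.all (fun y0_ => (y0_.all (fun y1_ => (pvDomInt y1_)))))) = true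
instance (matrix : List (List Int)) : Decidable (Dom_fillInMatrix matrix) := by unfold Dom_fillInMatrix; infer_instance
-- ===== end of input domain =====

-- B replaces A's in-place bottom-up table sweep by top-down memoized recursion computed
-- directly from the reachability recurrence (objective: alternative decomposition, same cost).

-- ===== PORT A =====
-- matrix[i][j] (indices are in range on Pre_ inputs; getD's default is never read there)
def mget (m : List (List Int)) (i j : Nat) : Int := (m.getD i []).getD j 0
-- toFill[i][j] read and write of the mutable boolean grid
def gget (g : List (List Bool)) (i j : Nat) : Bool := (g.getD i []).getD j false
def gset (g : List (List Bool)) (i j : Nat) (v : Bool) : List (List Bool) :=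
  g.set i ((g.getD i []).set j v)

-- the body of A's inner loop at cell (i, j)
def aStep (m : List (List Int)) (i j : Nat) (g : List (List Bool)) : List (List Bool) :=
  if i = 0 ∨ j = 0 then gset g i j true
  else if (decide (mget m i j ≥ mget m (i - 1) j) && gget g (i - 1) j)
        || (decide (mget m i j ≥ mget m i (j - 1)) && gget g i (j - 1))
       then gset g i j true else g

def fillInMatrix (matrix : List (List Int)) : List (List Bool) :=
  -- first loop: toFill.append([False] * len(matrix[0])) once per row
  let toFill := (List.range matrix.length).foldl
    (fun acc _ => acc ++ [List.replicate (matrix.headD []).length false]) []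
  -- second loop; len(toFill[0]) is invariant under the in-place cell updates,
  -- so the inner bound is read off the initial grid
  (List.range toFill.length).foldl
    (fun g i => (List.range (toFill.headD []).length).foldl (fun g2 j => aStep matrix i j g2) g)
    toFill

-- ===== PORT B =====
-- B's recursive reach(i, j) (the memo dict only caches; the value is this recursion)
def bReach (m : List (List Int)) (i j : Nat) : Bool :=
  if h : i = 0 ∨ j = 0 then true
  else (decide (mget m i j ≥ mget m (i - 1) j) && bReach m (i - 1) j)
    || (decide (mget m i j ≥ mget m i (j - 1)) && bReach m i (j - 1))
termination_by i + j
decreasing_by all_goals (push_neg at h; omega)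

def fillInMatrix_alt (matrix : List (List Int)) : List (List Bool) :=
  (List.range matrix.length).map
    (fun i => (List.range (matrix.headD []).length).map (fun j => bReach matrix i j))

-- ===== PRECONDITION & SPEC =====
-- Pre_ excludes ragged matrices on which Python A raises IndexError: a row shorter than
-- row 0 is only ever indexed when there are at least 2 rows and at least 2 columns.
def Pre_fillInMatrix (matrix : List (List Int)) : Prop :=
  matrix.length ≤ 1 ∨ (matrix.headD []).length ≤ 1 ∨
    ∀ row ∈ matrix, (matrix.headD []).length ≤ row.length
instance (matrix : List (List Int)) : Decidable (Pre_fillInMatrix matrix) := by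
  unfold Pre_fillInMatrix; infer_instance
def pvWitness_fillInMatrix : List (List Int) := [[1, 2], [2, 1]]

def Spec_fillInMatrix (matrix : List (List Int)) (out : List (List Bool)) : Prop := out = fillInMatrix_alt matrix
instance (matrix : List (List Int)) (out : List (List Bool)) : Decidable (Spec_fillInMatrix matrix out) := by unfold Spec_fillInMatrix; infer_instance

-- ===== CLAIM (what is proved, stated in full; the proofs are below) =====
def Claim_equal_fillInMatrix : Prop := ∀ (matrix : List (List Int)), Dom_fillInMatrix matrix → Pre_fillInMatrix matrix → Spec_fillInMatrix matrix (fillInMatrix matrix)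

-- ===== LEMMAS AND PROOFS =====

-- the first loop builds a rows × cols grid of False
theorem initFold_eq (x : List Bool) (n : Nat) :
    (List.range n).foldl (fun acc _ => acc ++ [x]) [] = List.replicate n x := by
  induction n with
  | zero => rfl
  | succ k ih => simp [List.range_succ, ih, List.replicate_succ', List.foldl_append]

theorem length_gset (g : List (List Bool)) (i j : Nat) (v : Bool) :
    (gset g i j v).length = g.length := by simp [gset]

theorem getD_gset (g : List (List Bool)) (i j : Nat) (v : Bool) (a : Nat) (hi : i < g.length) :
    (gset g i j v).getD a [] = if a = i then (g.getD i []).set j v else g.getD a [] := by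
  simp only [gset, List.getD_eq_getElem?_getD, List.getElem?_set]
  by_cases h : i = a
  · subst h; simp [hi, List.getD_eq_getElem?_getD]
  · simp [h, Ne.symm h]

theorem rowlen_gset (g : List (List Bool)) (i j : Nat) (v : Bool) (a : Nat) (hi : i < g.length) :
    ((gset g i j v).getD a []).length = (g.getD a []).length := by
  rw [getD_gset g i j v a hi]
  by_cases h : a = i <;> simp [h]

theorem gget_gset (g : List (List Bool)) (i j : Nat) (v : Bool) (a b : Nat)
    (hi : i < g.length) (hj : j < (g.getD i []).length) :
    gget (gset g i j v) a b = if a = i ∧ b = j then v else gget g a b := by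
  unfold gget
  rw [getD_gset g i j v a hi]
  by_cases ha : a = i
  · subst ha
    simp only [if_pos rfl, List.getD_eq_getElem?_getD]
    by_cases hb : j = b
    · subst hb
      simp only [List.getD_eq_getElem?_getD] at hj
      simp [List.getElem?_set, hj]
    · simp [List.getElem?_set, hb, Ne.symm hb]
  · simp [ha]

-- loop invariant: lengths are stable and the cells processed so far (row-major order
-- up to row i, column j) hold the reachability value, the rest are still False
def GridInv (m : List (List Int)) (R C i j : Nat) (g : List (List Bool)) : Prop :=
  g.length = R ∧ (∀ a, a < R → (g.getD a []).length = C) ∧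
  (∀ a b, a < R → b < C →
    gget g a b = if a < i ∨ (a = i ∧ b < j) then bReach m a b else false)

theorem GridInv_step (m : List (List Int)) (R C i j : Nat) (g : List (List Bool))
    (hInv : GridInv m R C i j g) (hi : i < R) (hj : j < C) :
    GridInv m R C i (j + 1) (aStep m i j g) := by
  obtain ⟨hL, hRow, hCell⟩ := hInv
  have hig : i < g.length := by omega
  have hjg : j < (g.getD i []).length := by rw [hRow i hi]; exact hj
  unfold aStep
  by_cases h0 : i = 0 ∨ j = 0
  · rw [if_pos h0]
    refine ⟨by rw [length_gset]; exact hL, ?_, ?_⟩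
    · intro a ha; rw [rowlen_gset _ _ _ _ _ hig]; exact hRow a ha
    · intro a b ha hb
      rw [gget_gset _ _ _ _ _ _ hig hjg]
      by_cases hab : a = i ∧ b = j
      · obtain ⟨rfl, rfl⟩ := hab
        rw [if_pos (⟨rfl, rfl⟩ : a = a ∧ b = b), if_pos (by omega : a < a ∨ (a = a ∧ b < b + 1))]
        conv_rhs => rw [bReach]
        rw [dif_pos h0]
      · rw [if_neg hab, hCell a b ha hb]
        have : (a < i ∨ (a = i ∧ b < j)) ↔ (a < i ∨ (a = i ∧ b < j + 1)) := by
          constructor <;> intro h <;> rcases h with h | ⟨rfl, h⟩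
          · left; exact h
          · right; exact ⟨rfl, by omega⟩
          · left; exact h
          · right; refine ⟨rfl, ?_⟩; rcases Nat.lt_succ_iff_lt_or_eq.mp h with h' | rfl
            · exact h'
            · exact absurd ⟨rfl, rfl⟩ hab
        by_cases hc : a < i ∨ (a = i ∧ b < j)
        · rw [if_pos hc, if_pos (this.mp hc)]
        · rw [if_neg hc, if_neg (fun hx => hc (this.mpr hx))]
    -- up / left neighbours have already been processed, so the loop's condition
    -- equals B's recursive condition at (i, j)
  · rw [if_neg h0]
    push_neg at h0
    obtain ⟨hi0, hj0⟩ := h0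
    have hup : gget g (i - 1) j = bReach m (i - 1) j := by
      rw [hCell (i - 1) j (by omega) hj, if_pos (Or.inl (by omega))]
    have hleft : gget g i (j - 1) = bReach m i (j - 1) := by
      rw [hCell i (j - 1) hi (by omega), if_pos (Or.inr ⟨rfl, by omega⟩)]
    have hcond : ((decide (mget m i j ≥ mget m (i - 1) j) && gget g (i - 1) j)
        || (decide (mget m i j ≥ mget m i (j - 1)) && gget g i (j - 1))) = bReach m i j := by
      rw [hup, hleft]
      conv_rhs => rw [bReach]
      rw [dif_neg (by push_neg; exact ⟨hi0, hj0⟩)]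
    have hself : gget g i j = false := by
      rw [hCell i j hi hj, if_neg (by omega)]
    have key : ∀ a b, a < R → b < C → a ≠ i ∨ b ≠ j →
        (if a < i ∨ (a = i ∧ b < j) then bReach m a b else false)
          = (if a < i ∨ (a = i ∧ b < j + 1) then bReach m a b else false) := by
      intro a b _ _ hab
      by_cases hc : a < i ∨ (a = i ∧ b < j)
      · rw [if_pos hc, if_pos (by rcases hc with h | ⟨rfl, h⟩; exact Or.inl h; exact Or.inr ⟨rfl, by omega⟩)]
      · rw [if_neg hc, if_neg ?_]
        intro hx
        rcases hx with h | ⟨rfl, h⟩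
        · exact hc (Or.inl h)
        · rcases hab with h' | h'
          · exact h' rfl
          · exact hc (Or.inr ⟨rfl, by omega⟩)
    by_cases hc : ((decide (mget m i j ≥ mget m (i - 1) j) && gget g (i - 1) j)
        || (decide (mget m i j ≥ mget m i (j - 1)) && gget g i (j - 1))) = true
    · rw [if_pos hc]
      refine ⟨by rw [length_gset]; exact hL, ?_, ?_⟩
      · intro a ha; rw [rowlen_gset _ _ _ _ _ hig]; exact hRow a ha
      · intro a b ha hb
        rw [gget_gset _ _ _ _ _ _ hig hjg]
        by_cases hab : a = i ∧ b = j
        · obtain ⟨rfl, rfl⟩ := hab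
          rw [if_pos (⟨rfl, rfl⟩ : a = a ∧ b = b), if_pos (by omega : a < a ∨ (a = a ∧ b < b + 1)), ← hcond, hc]
        · rw [if_neg hab, hCell a b ha hb]
          exact key a b ha hb (by by_contra hx; push_neg at hx; exact hab ⟨hx.1, hx.2⟩)
    · rw [if_neg hc]
      refine ⟨hL, hRow, ?_⟩
      intro a b ha hb
      by_cases hab : a = i ∧ b = j
      · obtain ⟨rfl, rfl⟩ := hab
        rw [hself, if_pos (by omega : a < a ∨ (a = a ∧ b < b + 1)), ← hcond]
        exact (Bool.not_eq_true _).mp hc |>.symm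
      · rw [hCell a b ha hb]
        exact key a b ha hb (by by_contra hx; push_neg at hx; exact hab ⟨hx.1, hx.2⟩)

theorem GridInv_inner (m : List (List Int)) (R C i : Nat) (hi : i < R) :
    ∀ j, j ≤ C → ∀ g, GridInv m R C i 0 g →
      GridInv m R C i j ((List.range j).foldl (fun g2 j' => aStep m i j' g2) g) := by
  intro j
  induction j with
  | zero => intro _ g hg; simpa using hg
  | succ k ih =>
    intro hk g hg
    rw [List.range_succ, List.foldl_append]
    exact GridInv_step m R C i k _ (ih (by omega) g hg) hi (by omega)

theorem GridInv_shift (m : List (List Int)) (R C i : Nat) (g : List (List Bool))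
    (h : GridInv m R C i C g) : GridInv m R C (i + 1) 0 g := by
  obtain ⟨hL, hRow, hCell⟩ := h
  refine ⟨hL, hRow, ?_⟩
  intro a b ha hb
  rw [hCell a b ha hb]
  by_cases hc : a < i ∨ (a = i ∧ b < C)
  · rw [if_pos hc, if_pos (Or.inl (by omega))]
  · rw [if_neg hc, if_neg (by push_neg at hc ⊢; refine ⟨by omega, fun h' => by omega⟩)]

theorem GridInv_outer (m : List (List Int)) (R C : Nat) :
    ∀ i, i ≤ R → ∀ g, GridInv m R C 0 0 g →
      GridInv m R C i 0 ((List.range i).foldl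
        (fun g i' => (List.range C).foldl (fun g2 j => aStep m i' j g2) g) g) := by
  intro i
  induction i with
  | zero => intro _ g hg; simpa using hg
  | succ k ih =>
    intro hk g hg
    rw [List.range_succ, List.foldl_append]
    simp only [List.foldl_cons, List.foldl_nil]
    exact GridInv_shift m R C k _
      (GridInv_inner m R C k (by omega) C (le_refl C) _ (ih (by omega) g hg))

theorem GridInv_init (m : List (List Int)) (R C : Nat) :
    GridInv m R C 0 0 (List.replicate R (List.replicate C false)) := by
  refine ⟨by simp, ?_, ?_⟩
  · intro a ha
    simp [List.getD_eq_getElem?_getD, List.getElem?_replicate, ha]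
  · intro a b ha hb
    simp [gget, List.getD_eq_getElem?_getD, List.getElem?_replicate, ha, hb]

-- ===== VERDICT (by name: the statement is the Claim_ definition above) =====
theorem fillInMatrix_spec : Claim_equal_fillInMatrix := by
  intro matrix _ _
  unfold Spec_fillInMatrix fillInMatrix fillInMatrix_alt
  simp only [initFold_eq]
  cases hm : matrix with
  | nil => simp
  | cons r rest =>
    set m := r :: rest with hmdef
    set R := m.length with hR
    set C := (m.headD []).length with hC
    have hlen : (List.replicate R (List.replicate C false)).length = R := by simp
    have hR1 : R = rest.length + 1 := by rw [hR, hmdef]; simp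
    have hhead : ((List.replicate R (List.replicate C false)).headD []).length = C := by
      rw [hR1]; simp [List.replicate_succ]
    rw [hlen, hhead]
    have hInv := GridInv_outer m R C R (le_refl R) _ (GridInv_init m R C)
    obtain ⟨hL, hRow, hCell⟩ := hInv
    set G := (List.range R).foldl
      (fun g i' => (List.range C).foldl (fun g2 j => aStep m i' j g2) g)
      (List.replicate R (List.replicate C false)) with hG
    apply List.ext_getElem
    · simp [hL]
    · intro a h1 h2
      have ha : a < R := by omega
      have hGa : G.getD a [] = G[a] := List.getD_eq_getElem G [] (by omega)
      simp only [List.getElem_map, List.getElem_range]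
      apply List.ext_getElem
      · have := hRow a ha
        rw [hGa] at this
        simp [this]
      · intro b hb1 hb2
        have hbC : b < C := by simpa using hb2
        have := hCell a b ha hbC
        rw [if_pos (Or.inl ha)] at this
        simp only [List.getElem_map, List.getElem_range]
        rw [← this]
        unfold gget
        rw [hGa, List.getD_eq_getElem (G[a]) false (by rw [← hGa, hRow a ha]; exact hbC)]
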